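-- pv_equiv track=rewrite | github.com/k0rd/bakerrrr | main.py | _pick_property
-- ===== SOURCE A (Python) =====
-- def _pick_property(records, preferred_archetypes=None, used=None, building_only=True):
--     used = used or set()
--     candidates = []
--
--     for record in records:
--         if record["id"] in used:
--             continue
--         if building_only and record["kind"] != "building":
--             continue
--         if preferred_archetypes and record.get("archetype") not in preferred_archetypes:
--             continue
--         candidates.append(record)
--
--     if not candidates and preferred_archetypes:
--         for record in records:
--             if record["id"] in used:
--                 continue
--             if building_only and record["kind"] != "building":
--                 continue
--             candidates.append(record)
--
--     if not candidates:
--         return None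
--
--     return candidates[0]
-- ===== SOURCE B (Python) =====
-- def _pick_property(records, preferred_archetypes=None, used=None, building_only=True):
--     used = used or set()
--     first_strict = None
--     first_loose = None
--     for record in records:
--         if record["id"] in used:
--             continue
--         if building_only and record["kind"] != "building":
--             continue
--         if first_loose is None:
--             first_loose = record
--         if first_strict is None and (
--             not preferred_archetypes
--             or record.get("archetype") in preferred_archetypes
--         ):
--             first_strict = record
--     if first_strict is not None:
--         return first_strict
--     if preferred_archetypes:
--         return first_loose
--     return None
-- ===== Notes on version B (the rewrite author's own statement) =====
-- stated objective: alternative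
-- what changed: Replaces the candidate-list building plus possible second fallback scan with a single pass over records that maintains two first-match candidates (strict: archetype-matching, loose: ignoring archetype) and chooses between them afterwards.
import Mathlib
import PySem

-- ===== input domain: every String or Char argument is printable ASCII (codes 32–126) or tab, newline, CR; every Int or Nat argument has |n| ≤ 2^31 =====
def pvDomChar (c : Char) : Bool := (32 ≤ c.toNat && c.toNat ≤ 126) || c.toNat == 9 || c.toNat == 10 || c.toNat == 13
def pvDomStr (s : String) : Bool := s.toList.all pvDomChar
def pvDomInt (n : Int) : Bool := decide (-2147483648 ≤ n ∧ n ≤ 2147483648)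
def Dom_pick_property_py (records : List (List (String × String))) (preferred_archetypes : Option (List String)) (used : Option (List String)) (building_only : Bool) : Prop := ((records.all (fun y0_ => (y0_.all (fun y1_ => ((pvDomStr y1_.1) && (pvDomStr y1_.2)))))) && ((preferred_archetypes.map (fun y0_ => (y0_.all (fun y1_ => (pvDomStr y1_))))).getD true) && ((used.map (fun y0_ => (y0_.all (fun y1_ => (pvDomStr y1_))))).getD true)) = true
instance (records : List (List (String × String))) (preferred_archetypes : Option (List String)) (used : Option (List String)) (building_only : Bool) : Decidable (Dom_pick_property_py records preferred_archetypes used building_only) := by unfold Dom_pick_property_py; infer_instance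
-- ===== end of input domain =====

-- B replaces the two-scan candidate-list construction with one pass keeping two first-match candidates (same results; alternative decomposition, not claimed faster).
-- ===== PORT A =====
-- record[k] / record.get(k): first-match lookup in the association list (exact for Python dicts modeled as assoc lists)
def pvLookup (r : List (String × String)) (k : String) : Option String :=
  (r.find? (fun p => p.1 == k)).map (·.2)

-- truthiness of `preferred_archetypes` (None or empty list is falsy)
def pvTruthy (o : Option (List String)) : Bool :=
  match o with
  | some l => !l.isEmpty
  | none => false

-- `record["id"] in used` (Pre_ guarantees "id" is present; `used or set()` is `used.getD []`)
def pvIdUsed (usedL : List String) (r : List (String × String)) : Bool :=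
  match pvLookup r "id" with
  | some i => usedL.contains i
  | none => false

-- `building_only and record["kind"] != "building"` (Pre_ guarantees "kind" is present when read)
def pvKindSkip (building_only : Bool) (r : List (String × String)) : Bool :=
  building_only && ((pvLookup r "kind").getD "") != "building"

-- `preferred_archetypes and record.get("archetype") not in preferred_archetypes`
def pvArchSkip (preferred_archetypes : Option (List String)) (r : List (String × String)) : Bool :=
  pvTruthy preferred_archetypes &&
    (match pvLookup r "archetype" with
     | some a => !(preferred_archetypes.getD []).contains a
     | none => true)

def pick_property_py (records : List (List (String × String))) (preferred_archetypes : Option (List String)) (used : Option (List String)) (building_only : Bool) : Option (List (String × String)) :=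
  let usedL := used.getD []
  let candidates := records.foldl (fun cs r =>
    if pvIdUsed usedL r then cs
    else if pvKindSkip building_only r then cs
    else if pvArchSkip preferred_archetypes r then cs
    else cs ++ [r]) []
  let candidates :=
    if candidates.isEmpty && pvTruthy preferred_archetypes then
      records.foldl (fun cs r =>
        if pvIdUsed usedL r then cs
        else if pvKindSkip building_only r then cs
        else cs ++ [r]) []
    else candidates
  if candidates.isEmpty then none else candidates.head?

-- ===== PORT B =====
-- `first_strict is None and (not preferred_archetypes or record.get("archetype") in preferred_archetypes)`
def pvStrictOk (preferred_archetypes : Option (List String)) (r : List (String × String)) : Bool :=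
  !pvTruthy preferred_archetypes ||
    (match pvLookup r "archetype" with
     | some a => (preferred_archetypes.getD []).contains a
     | none => false)

def pick_property_py_alt (records : List (List (String × String))) (preferred_archetypes : Option (List String)) (used : Option (List String)) (building_only : Bool) : Option (List (String × String)) :=
  let usedL := used.getD []
  let st := records.foldl (fun (acc : Option (List (String × String)) × Option (List (String × String))) r =>
    if pvIdUsed usedL r then acc
    else if pvKindSkip building_only r then acc
    else
      let fl := if acc.2.isNone then some r else acc.2
      let fs := if acc.1.isNone && pvStrictOk preferred_archetypes r then some r else acc.1
      (fs, fl)) (none, none)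
  match st.1 with
  | some r => some r
  | none => if pvTruthy preferred_archetypes then st.2 else none

-- ===== PRECONDITION & SPEC =====
-- Pre_ excludes exactly the inputs on which the Python raises KeyError: a record with no "id"
-- key, or (when building_only and the record is not skipped as used) no "kind" key.
def Pre_pick_property_py (records : List (List (String × String))) (preferred_archetypes : Option (List String)) (used : Option (List String)) (building_only : Bool) : Prop :=
  ∀ r ∈ records, (pvLookup r "id").isSome = true ∧
    (building_only = true → pvIdUsed (used.getD []) r = true ∨ (pvLookup r "kind").isSome = true)
instance (records : List (List (String × String))) (preferred_archetypes : Option (List String)) (used : Option (List String)) (building_only : Bool) : Decidable (Pre_pick_property_py records preferred_archetypes used building_only) := by unfold Pre_pick_property_py; infer_instance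
def pvWitness_pick_property_py : (List (List (String × String))) × Option (List String) × Option (List String) × Bool :=
  ([[("id", "a"), ("kind", "building"), ("archetype", "p")], [("id", "b"), ("kind", "building")]], some ["q"], some ["c"], true)

def Spec_pick_property_py (records : List (List (String × String))) (preferred_archetypes : Option (List String)) (used : Option (List String)) (building_only : Bool) (out : Option (List (String × String))) : Prop := out = pick_property_py_alt records preferred_archetypes used building_only
instance (records : List (List (String × String))) (preferred_archetypes : Option (List String)) (used : Option (List String)) (building_only : Bool) (out : Option (List (String × String))) : Decidable (Spec_pick_property_py records preferred_archetypes used building_only out) := by unfold Spec_pick_property_py; infer_instance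

-- ===== CLAIM (what is proved, stated in full; the proofs are below) =====
def Claim_equal_pick_property_py : Prop := ∀ (records : List (List (String × String))) (preferred_archetypes : Option (List String)) (used : Option (List String)) (building_only : Bool), Dom_pick_property_py records preferred_archetypes used building_only → Pre_pick_property_py records preferred_archetypes used building_only → Spec_pick_property_py records preferred_archetypes used building_only (pick_property_py records preferred_archetypes used building_only)

-- ===== LEMMAS AND PROOFS =====

-- A's first candidate-accumulating loop builds `cs ++ filter`.
theorem pvFoldA1 (i k a : List (String × String) → Bool)
    (rs : List (List (String × String))) (cs : List (List (String × String))) :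
    rs.foldl (fun cs r => if i r then cs else if k r then cs else if a r then cs else cs ++ [r]) cs
      = cs ++ rs.filter (fun r => !i r && (!k r && !a r)) := by
  induction rs generalizing cs with
  | nil => simp
  | cons r rs ih =>
    simp only [List.foldl, List.filter]
    by_cases h1 : i r = true <;> by_cases h2 : k r = true <;> by_cases h3 : a r = true <;>
      simp [h1, h2, h3, ih]

-- A's fallback loop builds `cs ++ filter` (no archetype test).
theorem pvFoldA2 (i k : List (String × String) → Bool)
    (rs : List (List (String × String))) (cs : List (List (String × String))) :
    rs.foldl (fun cs r => if i r then cs else if k r then cs else cs ++ [r]) cs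
      = cs ++ rs.filter (fun r => !i r && !k r) := by
  induction rs generalizing cs with
  | nil => simp
  | cons r rs ih =>
    simp only [List.foldl, List.filter]
    by_cases h1 : i r = true <;> by_cases h2 : k r = true <;> simp [h1, h2, ih]

-- B's fold computes the first strict and first loose survivors.
theorem pvFoldB (i k strict : List (String × String) → Bool)
    (rs : List (List (String × String)))
    (fs fl : Option (List (String × String))) :
    rs.foldl (fun (acc : Option (List (String × String)) × Option (List (String × String))) r =>
      if i r then acc
      else if k r then acc
      else
        let fl := if acc.2.isNone then some r else acc.2
        let fs := if acc.1.isNone && strict r then some r else acc.1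
        (fs, fl)) (fs, fl)
    = (fs.or (rs.find? (fun r => (!i r && !k r) && strict r)),
       fl.or (rs.find? (fun r => !i r && !k r))) := by
  induction rs generalizing fs fl with
  | nil => simp
  | cons r rs ih =>
    rw [List.foldl_cons]
    by_cases h1 : i r = true
    · rw [if_pos h1, ih]
      simp [List.find?, h1]
    · rw [if_neg h1]
      by_cases h2 : k r = true
      · rw [if_pos h2, ih]
        simp [List.find?, h1, h2]
      · rw [if_neg h2]
        show List.foldl _ ((if (fs.isNone && strict r) = true then some r else fs),
          (if fl.isNone = true then some r else fl)) rs = _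
        rw [ih]
        by_cases hst : strict r = true <;> cases fs <;> cases fl <;>
          simp [List.find?, h1, h2, hst]

-- For any record, B's strict test is the negation of A's archetype skip.
theorem pvStrictOk_eq (pa : Option (List String)) (r : List (String × String)) :
    pvStrictOk pa r = !pvArchSkip pa r := by
  unfold pvStrictOk pvArchSkip
  cases h : pvLookup r "archetype" <;> cases ht : pvTruthy pa <;> simp

theorem pvFilterNilIff {α : Type} (p : α → Bool) (l : List α) :
    (l.filter p).isEmpty = true ↔ l.find? p = none := by
  rw [List.isEmpty_iff, List.filter_eq_nil_iff, List.find?_eq_none]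

-- ===== VERDICT (by name: the statement is the Claim_ definition above) =====
theorem pick_property_py_spec : Claim_equal_pick_property_py := by
  intro records pa used bo _ _
  unfold Spec_pick_property_py pick_property_py pick_property_py_alt
  simp only [pvFoldA1, pvFoldA2, pvFoldB, List.nil_append, Option.none_or]
  have hpred : (fun r => (!pvIdUsed (used.getD []) r && !pvKindSkip bo r) && pvStrictOk pa r)
      = (fun r => !pvIdUsed (used.getD []) r && (!pvKindSkip bo r && !pvArchSkip pa r)) := by
    funext r
    rw [pvStrictOk_eq, Bool.and_assoc]
  rw [hpred]
  cases h1 : records.find? (fun r => !pvIdUsed (used.getD []) r && (!pvKindSkip bo r && !pvArchSkip pa r)) with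
  | some c =>
    have hne : (records.filter (fun r => !pvIdUsed (used.getD []) r && (!pvKindSkip bo r && !pvArchSkip pa r))).isEmpty = false := by
      by_cases he : (records.filter (fun r => !pvIdUsed (used.getD []) r && (!pvKindSkip bo r && !pvArchSkip pa r))).isEmpty = true
      · rw [pvFilterNilIff] at he; rw [he] at h1; cases h1
      · simpa using he
    simp [hne, h1]
  | none =>
    have he : (records.filter (fun r => !pvIdUsed (used.getD []) r && (!pvKindSkip bo r && !pvArchSkip pa r))).isEmpty = true := by
      rw [pvFilterNilIff]; exact h1
    by_cases ht : pvTruthy pa = true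
    · simp only [he, ht, Bool.true_and]
      cases h2 : records.find? (fun r => !pvIdUsed (used.getD []) r && !pvKindSkip bo r) with
      | some c =>
        have hne2 : (records.filter (fun r => !pvIdUsed (used.getD []) r && !pvKindSkip bo r)).isEmpty = false := by
          by_cases he2 : (records.filter (fun r => !pvIdUsed (used.getD []) r && !pvKindSkip bo r)).isEmpty = true
          · rw [pvFilterNilIff] at he2; rw [he2] at h2; cases h2
          · simpa using he2
        simp [hne2, h2]
      | none =>
        have he2 : (records.filter (fun r => !pvIdUsed (used.getD []) r && !pvKindSkip bo r)).isEmpty = true := by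
          rw [pvFilterNilIff]; exact h2
        simp [he2]
    · simp [he, ht]
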